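-- pv_equiv track=rewrite | github.com/claudihf/Dragon-Curve | dragon_curve.py | read_all_coords
-- ===== SOURCE A (Python) =====
-- def change_orientation(start: str, pathway: str):
--     """A helper function that will keep change the orientation for each pathway made
--     """
--     if start == "F":
--         if pathway == "right":
--             return "R"
--         if pathway == "left":
--             return "L"
--     if start == "R":
--         if pathway == "right":
--             return "D"
--         if pathway == "left":
--             return "F"
--     if start == "D":
--         if pathway == "right":
--             return "L"
--         if pathway == "left":
--             return "R"
--     if start == "L":
--         if pathway == "right":
--             return "F"
--         if pathway == "left":
--             return "D"
--
-- def read_next_coords(start_x, start_y, direction: str, oriented: str, amount: int):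
--     """ This function will take whichever coordinates given and create the next coordinate
--     start_x : integer that represents x coordinate that we work from
--     start_y : integer that represents y coordinate that we work from
--     direction: string that is either "right" or "left"
--     oriented: string tells us which way we are pointing in the direction of
--     amount: integer that says how much we travel each time
--     """
--
--     # Turning right
--     if direction == "right":
--         if oriented == "F":
--             return(start_x + amount, start_y)
--         if oriented == "R":
--             return (start_x, start_y + amount)
--         if oriented == "D":
--             return (start_x - amount, start_y)
--         if oriented == "L":
--             return (start_x, start_y - amount)
--
--     # Turning left
--     if direction == "left":
--
--         # Depending on said turning path and then which way it is oriented,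
--         # it will out put the next coordinates
--         if oriented == "F":
--             return (start_x - amount, start_y)
--         if oriented == "R":
--             return (start_x, start_y - amount)
--         if oriented == "D":
--             return (start_x + amount, start_y)
--         if oriented == "L":
--             return (start_x, start_y + amount)
--
-- def read_all_coords(path: list, ogx: int, ogy: int, amount: int):
--     """ Using the helper function of read_next_coords() we will be able to input
--     a list of directions it turns and can output a string of coordinates based
--     on the starting coordinate
--     """
--     point = "F"
--     coords = [(ogx, ogy)]
--     for direction in path:
--         coords.append(read_next_coords(ogx, ogy, direction, point, amount))
--         ogx = coords[-1][0]
--         ogy = coords[-1][1]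
--         point = change_orientation(point, direction)
--     return coords
-- ===== SOURCE B (Python) =====
-- # Staged-pass reimplementation: instead of one stateful walk, compute
-- # (1) turn increments, (2) heading prefix sums, (3) step vectors, and
-- # (4) the coordinates as prefix sums of the scaled steps, zipped at the end.
--
-- _DIRS = [(1, 0), (0, 1), (-1, 0), (0, -1)]
--
--
-- def _turn(d):
--     if d == "right":
--         return 1
--     if d == "left":
--         return -1
--     raise ValueError("invalid direction: %r" % (d,))
--
--
-- def _scan_add(start, items):
--     out = [start]
--     for v in items:
--         start = start + v
--         out.append(start)
--     return out
--
--
-- def read_all_coords(path: list, ogx: int, ogy: int, amount: int):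
--     turns = [_turn(d) for d in path]
--     pref = _scan_add(0, turns)          # heading before each step (length n+1)
--     # step i moves along _DIRS[heading] for a right turn and against it
--     # (i.e. _DIRS[heading+2]) for a left turn: (p + 1 - t) % 4
--     steps = [_DIRS[(p + 1 - t) % 4] for p, t in zip(pref, turns)]
--     xs = _scan_add(ogx, [dx * amount for dx, dy in steps])
--     ys = _scan_add(ogy, [dy * amount for dx, dy in steps])
--     return list(zip(xs, ys))
-- ===== Notes on version B (the rewrite author's own statement) =====
-- stated objective: alternative
-- what changed: Replaces A's single stateful walk with string orientation letters by staged passes: map directions to turn increments, prefix-sum them into headings, map headings to step vectors, and prefix-sum the scaled steps into the coordinate lists, zipped at the end.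
-- outside the precondition, e.g. on read_all_coords(['up'], 0, 0, 1): A raises TypeError, B raises ValueError
import Mathlib
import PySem

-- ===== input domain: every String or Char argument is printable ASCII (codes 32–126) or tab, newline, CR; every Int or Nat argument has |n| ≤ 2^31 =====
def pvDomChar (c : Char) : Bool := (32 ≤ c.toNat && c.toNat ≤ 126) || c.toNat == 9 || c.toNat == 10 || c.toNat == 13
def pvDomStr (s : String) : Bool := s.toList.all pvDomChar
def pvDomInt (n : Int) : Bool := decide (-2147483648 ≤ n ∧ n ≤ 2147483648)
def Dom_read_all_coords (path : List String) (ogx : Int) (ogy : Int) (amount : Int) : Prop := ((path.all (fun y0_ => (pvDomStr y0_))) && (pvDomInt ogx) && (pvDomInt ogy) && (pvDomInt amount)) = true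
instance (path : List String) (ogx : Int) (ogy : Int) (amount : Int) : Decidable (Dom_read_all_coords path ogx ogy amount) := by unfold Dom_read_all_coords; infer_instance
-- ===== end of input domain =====

-- B replaces A's single stateful walk (string orientation letters, branch-tree
-- helpers) by staged passes: turn increments, heading prefix sums, step vectors,
-- and coordinate prefix sums zipped at the end (objective: alternative; same O(n)).


-- ===== PORT A =====
-- helper: falls through to an implicit `return None` → Option; none = Python None
def change_orientation (start : String) (pathway : String) : Option String :=
  if start = "F" then
    if pathway = "right" then some "R"
    else if pathway = "left" then some "L"
    else none
  else if start = "R" then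
    if pathway = "right" then some "D"
    else if pathway = "left" then some "F"
    else none
  else if start = "D" then
    if pathway = "right" then some "L"
    else if pathway = "left" then some "R"
    else none
  else if start = "L" then
    if pathway = "right" then some "F"
    else if pathway = "left" then some "D"
    else none
  else none

-- helper: implicit `return None` on fall-through → Option
def read_next_coords (start_x start_y : Int) (direction oriented : String) (amount : Int) : Option (Int × Int) :=
  if direction = "right" then
    if oriented = "F" then some (start_x + amount, start_y)
    else if oriented = "R" then some (start_x, start_y + amount)
    else if oriented = "D" then some (start_x - amount, start_y)
    else if oriented = "L" then some (start_x, start_y - amount)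
    else none
  else if direction = "left" then
    if oriented = "F" then some (start_x - amount, start_y)
    else if oriented = "R" then some (start_x, start_y - amount)
    else if oriented = "D" then some (start_x + amount, start_y)
    else if oriented = "L" then some (start_x, start_y + amount)
    else none
  else none

-- A's loop; `point` may be Python None (Option String); a None appended coordinate
-- means Python raises TypeError at `coords[-1][0]`, modelled as `none` overall
def read_all_coords_loopA : List String → Option String → Int → Int → Int → List (Int × Int) → Option (List (Int × Int))
  | [], _, _, _, _, coords => some coords
  | d :: rest, point, ogx, ogy, amount, coords =>
    match (match point with
           | some p => read_next_coords ogx ogy d p amount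
           | none => none) with
    | none => none   -- TypeError: coords[-1] is None, indexing raises
    | some c =>
      read_all_coords_loopA rest
        (match point with | some p => change_orientation p d | none => none)
        c.1 c.2 amount (coords ++ [c])

def read_all_coords (path : List String) (ogx : Int) (ogy : Int) (amount : Int) : List (Int × Int) :=
  (read_all_coords_loopA path (some "F") ogx ogy amount [(ogx, ogy)]).getD []

-- ===== PORT B =====
-- _turn: on a direction that is neither "right" nor "left" Python B raises
-- ValueError (excluded by Pre_); the port returns 0 there, unreached under Pre_.
def turnB (d : String) : Int :=
  if d = "right" then 1 else if d = "left" then -1 else 0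

-- _scan_add: running prefix sums, start included
def scanAdd (start : Int) : List Int → List Int
  | [] => [start]
  | v :: vs => start :: scanAdd (start + v) vs

-- _DIRS[i] for an index i already reduced mod 4 (so i ∈ {0,1,2,3})
def dirsOf (i : Int) : Int × Int :=
  if i = 0 then (1, 0) else if i = 1 then (0, 1) else if i = 2 then (-1, 0) else (0, -1)

def read_all_coords_alt (path : List String) (ogx : Int) (ogy : Int) (amount : Int) : List (Int × Int) :=
  let turns := path.map turnB
  let pref := scanAdd 0 turns
  let steps := (pref.zip turns).map (fun pt => dirsOf (PySem.Int.mod (pt.1 + 1 - pt.2) 4))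
  let xs := scanAdd ogx (steps.map (fun st => st.1 * amount))
  let ys := scanAdd ogy (steps.map (fun st => st.2 * amount))
  xs.zip ys

-- ===== PRECONDITION & SPEC =====
-- A raises TypeError (indexing the None returned by read_next_coords) on the first
-- path element that is neither "right" nor "left"; Pre_ excludes exactly those inputs
-- (B raises ValueError there).
def Pre_read_all_coords (path : List String) (ogx : Int) (ogy : Int) (amount : Int) : Prop :=
  ∀ d ∈ path, d = "right" ∨ d = "left"
instance (path : List String) (ogx : Int) (ogy : Int) (amount : Int) : Decidable (Pre_read_all_coords path ogx ogy amount) := by unfold Pre_read_all_coords; infer_instance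

def pvWitness_read_all_coords : List String × Int × Int × Int := (["right", "right", "left"], 0, 0, 2)

def Spec_read_all_coords (path : List String) (ogx : Int) (ogy : Int) (amount : Int) (out : List (Int × Int)) : Prop := out = read_all_coords_alt path ogx ogy amount
instance (path : List String) (ogx : Int) (ogy : Int) (amount : Int) (out : List (Int × Int)) : Decidable (Spec_read_all_coords path ogx ogy amount out) := by unfold Spec_read_all_coords; infer_instance

-- ===== CLAIM (what is proved, stated in full; the proofs are below) =====
def Claim_equal_read_all_coords : Prop := ∀ (path : List String) (ogx : Int) (ogy : Int) (amount : Int), Dom_read_all_coords path ogx ogy amount → Pre_read_all_coords path ogx ogy amount → Spec_read_all_coords path ogx ogy amount (read_all_coords path ogx ogy amount)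

-- ===== LEMMAS AND PROOFS =====
-- B's pipeline, generalized over the starting heading sum s (alt uses s = 0)
def bCoords (s x y a : Int) (path : List String) : List (Int × Int) :=
  let turns := path.map turnB
  let pref := scanAdd s turns
  let steps := (pref.zip turns).map (fun pt => dirsOf (PySem.Int.mod (pt.1 + 1 - pt.2) 4))
  (scanAdd x (steps.map (fun st => st.1 * a))).zip (scanAdd y (steps.map (fun st => st.2 * a)))

theorem alt_eq_bCoords (path : List String) (x y a : Int) :
    read_all_coords_alt path x y a = bCoords 0 x y a path := rfl

-- the orientation letter A keeps at heading sum s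
def pointOfI (s : Int) : String :=
  if s % 4 = 0 then "F" else if s % 4 = 1 then "R" else if s % 4 = 2 then "D" else "L"

theorem bCoords_cons_right (s x y a : Int) (rest : List String) :
    bCoords s x y a ("right" :: rest) =
      (x, y) :: bCoords (s + 1) (x + (dirsOf (PySem.Int.mod s 4)).1 * a)
                         (y + (dirsOf (PySem.Int.mod s 4)).2 * a) a rest := by
  have h : s + 1 - 1 = s := by ring
  simp [bCoords, scanAdd, turnB, h]

theorem bCoords_cons_left (s x y a : Int) (rest : List String) :
    bCoords s x y a ("left" :: rest) =
      (x, y) :: bCoords (s - 1) (x + (dirsOf (PySem.Int.mod (s + 2) 4)).1 * a)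
                         (y + (dirsOf (PySem.Int.mod (s + 2) 4)).2 * a) a rest := by
  have h : s + 1 - -1 = s + 2 := by ring
  have h2 : s + -1 = s - 1 := by ring
  simp [bCoords, scanAdd, turnB, h, h2]

theorem bCoords_head (s x y a : Int) (p : List String) :
    bCoords s x y a p = (x, y) :: (bCoords s x y a p).tail := by
  cases p <;> simp [bCoords, scanAdd]

theorem pointOfI_letter (t : Int) (k : Int) (L : String)
    (hk : t % 4 = k)
    (hL : (k = 0 → L = "F") ∧ (k = 1 → L = "R") ∧ (k = 2 → L = "D") ∧ (k = 3 → L = "L")) :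
    some L = some (pointOfI t) := by
  obtain ⟨h0, h1, h2, h3⟩ := hL
  have hb : k = 0 ∨ k = 1 ∨ k = 2 ∨ k = 3 := by omega
  unfold pointOfI
  rcases hb with rfl | rfl | rfl | rfl <;> simp [hk, h0, h1, h2, h3]

theorem loopA_eq_bCoords (path : List String) :
    ∀ (s x y a : Int) (acc : List (Int × Int)),
    (∀ d ∈ path, d = "right" ∨ d = "left") →
    read_all_coords_loopA path (some (pointOfI s)) x y a acc =
      some (acc ++ (bCoords s x y a path).tail) := by
  induction path with
  | nil =>
    intro s x y a acc _
    simp [read_all_coords_loopA, bCoords, scanAdd]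
  | cons d rest ih =>
    intro s x y a acc hall
    have hd := hall d (List.mem_cons_self ..)
    have hrest : ∀ d' ∈ rest, d' = "right" ∨ d' = "left" :=
      fun d' hm => hall d' (List.mem_cons_of_mem _ hm)
    have hmod : PySem.Int.mod s 4 = s % 4 := PySem.Int.mod_eq_emod_of_pos (by omega)
    have h4 : s % 4 = 0 ∨ s % 4 = 1 ∨ s % 4 = 2 ∨ s % 4 = 3 := by omega
    rcases hd with rfl | rfl
    · rw [bCoords_cons_right, hmod]
      rcases h4 with h | h | h | h <;> rw [h] <;>
        simp [read_all_coords_loopA, read_next_coords, change_orientation,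
          pointOfI, dirsOf, h] <;> (try simp only [← sub_eq_add_neg]) <;>
        first
        | (rw [pointOfI_letter (s+1) 1 _ (by omega) (by simp), ih _ _ _ a _ hrest];
           conv_rhs => rw [bCoords_head]
           ) 
        | (rw [pointOfI_letter (s+1) 2 _ (by omega) (by simp), ih _ _ _ a _ hrest];
           conv_rhs => rw [bCoords_head]
           )
        | (rw [pointOfI_letter (s+1) 3 _ (by omega) (by simp), ih _ _ _ a _ hrest];
           conv_rhs => rw [bCoords_head]
           )
        | (rw [pointOfI_letter (s+1) 0 _ (by omega) (by simp), ih _ _ _ a _ hrest];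
           conv_rhs => rw [bCoords_head]
           )
      all_goals simp
    · have hmod2 : PySem.Int.mod (s + 2) 4 = (s + 2) % 4 :=
        PySem.Int.mod_eq_emod_of_pos (by omega)
      rw [bCoords_cons_left, hmod2]
      rcases h4 with h | h | h | h <;>
        first
          | rw [show (s + 2) % 4 = 2 from by omega]
          | rw [show (s + 2) % 4 = 3 from by omega]
          | rw [show (s + 2) % 4 = 0 from by omega]
          | rw [show (s + 2) % 4 = 1 from by omega]
      all_goals
        simp [read_all_coords_loopA, read_next_coords, change_orientation,
          pointOfI, dirsOf, h] <;> (try simp only [← sub_eq_add_neg]) <;>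
        first
        | (rw [pointOfI_letter (s-1) 3 _ (by omega) (by simp), ih _ _ _ a _ hrest];
           conv_rhs => rw [bCoords_head]
           )
        | (rw [pointOfI_letter (s-1) 0 _ (by omega) (by simp), ih _ _ _ a _ hrest];
           conv_rhs => rw [bCoords_head]
           )
        | (rw [pointOfI_letter (s-1) 1 _ (by omega) (by simp), ih _ _ _ a _ hrest];
           conv_rhs => rw [bCoords_head]
           )
        | (rw [pointOfI_letter (s-1) 2 _ (by omega) (by simp), ih _ _ _ a _ hrest];
           conv_rhs => rw [bCoords_head]
           )
      all_goals simp

-- ===== VERDICT (by name: the statement is the Claim_ definition above) =====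
theorem read_all_coords_spec : Claim_equal_read_all_coords := by
  intro path ogx ogy amount _ hpre
  unfold Spec_read_all_coords read_all_coords
  rw [alt_eq_bCoords,
      show (some "F") = some (pointOfI 0) from rfl,
      loopA_eq_bCoords path 0 ogx ogy amount _ hpre]
  conv_rhs => rw [bCoords_head]
  simp
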